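-- pv_equiv track=rewrite | github.com/FernE047/pythonscript | image_projects/morph_projects/manual_config/old_versions/generate_config_v7.py | ordenaLinhaInd
-- ===== SOURCE A (Python) =====
-- from enum import Enum
--
-- CoordData = tuple[int, int]
--
-- class Direction(Enum):
--     DOWN_RIGHT = 0
--     DOWN = 1
--     DOWN_LEFT = 2
--     LEFT = 3
--     UP_LEFT = 4
--     UP = 5
--     UP_RIGHT = 6
--     RIGHT = 7
--
-- def apply_direction(coord: CoordData | None, direction: Direction) -> CoordData:
--     if coord is None:
--         raise ValueError("Coordinate cannot be None")
--     x, y = coord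
--     if direction == Direction.DOWN_RIGHT:
--         return (x + 1, y + 1)
--     if direction == Direction.DOWN:
--         return (x, y + 1)
--     if direction == Direction.DOWN_LEFT:
--         return (x - 1, y + 1)
--     if direction == Direction.LEFT:
--         return (x - 1, y)
--     if direction == Direction.UP_LEFT:
--         return (x - 1, y - 1)
--     if direction == Direction.UP:
--         return (x, y - 1)
--     if direction == Direction.UP_RIGHT:
--         return (x + 1, y - 1)
--     if direction == Direction.RIGHT:
--         return (x + 1, y)
--
-- def ordenaLinhaInd(linha: list[CoordData]) -> list[CoordData]:
--     tamanho = len(linha)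
--     for tamanhoPossivel in range(tamanho, -1, -1):
--         for n in range(tamanho):
--             linhaTeste = linha.copy()
--             primeiroPonto = linha[n]
--             linhaTeste = ordenaLinhaIt(linhaTeste, inicio=primeiroPonto)
--             if len(linhaTeste) == tamanhoPossivel:
--                 return linhaTeste
--     error_message = f"não foi possível ordenar a linha, analise: {linha}"
--     raise ValueError(error_message)
--
-- def ordenaLinhaIt(
--     linhaDesordenada: list[CoordData],
--     anteriores: list[CoordData] | None = None,
--     inicio: CoordData | None = None,
-- ) -> list[CoordData]:
--     if inicio is None:
--         if anteriores is None:
--             inicio = linhaDesordenada[0]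
--         else:
--             inicio = anteriores[0]
--     if anteriores is None:
--         anteriores = [inicio]
--     linhaOrdenada = anteriores.copy()
--     pontoInicial = anteriores[-1]
--     anteriores = None
--     while True:
--         pontos: list[CoordData] = []
--         for d in Direction:
--             pontoAtual = apply_direction(pontoInicial, d)
--             if pontoAtual in linhaDesordenada:
--                 if pontoAtual not in linhaOrdenada:
--                     pontos.append(pontoAtual)
--         if len(pontos) == 0:
--             return linhaOrdenada
--         if len(pontos) == 1:
--             pontoInicial = pontos[0]
--             linhaOrdenada.append(pontoInicial)
--         else:
--             linhaMaxima = linhaOrdenada.copy()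
--             for ponto in pontos:
--                 novaLinha = ordenaLinhaIt(
--                     linhaDesordenada, anteriores=linhaOrdenada + [ponto]
--                 )
--                 if len(novaLinha) > len(linhaMaxima):
--                     linhaMaxima = novaLinha.copy()
--             return linhaMaxima
-- ===== SOURCE B (Python) =====
-- CoordData = tuple[int, int]
--
-- def _vizinhos(p):
--     x, y = p
--     return [(x + 1, y + 1), (x, y + 1), (x - 1, y + 1), (x - 1, y),
--             (x - 1, y - 1), (x, y - 1), (x + 1, y - 1), (x + 1, y)]
--
-- def ordenaLinhaIt(linhaDesordenada, anteriores=None, inicio=None):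
--     if inicio is None:
--         if anteriores is None:
--             inicio = linhaDesordenada[0]
--         else:
--             inicio = anteriores[0]
--     if anteriores is None:
--         anteriores = [inicio]
--     linhaOrdenada = anteriores.copy()
--     pontoInicial = anteriores[-1]
--     while True:
--         pontos = [q for q in _vizinhos(pontoInicial)
--                   if q in linhaDesordenada and q not in linhaOrdenada]
--         if len(pontos) == 0:
--             return linhaOrdenada
--         if len(pontos) == 1:
--             pontoInicial = pontos[0]
--             linhaOrdenada.append(pontoInicial)
--         else:
--             linhaMaxima = linhaOrdenada
--             for ponto in pontos:
--                 novaLinha = ordenaLinhaIt(linhaDesordenada,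
--                                           anteriores=linhaOrdenada + [ponto])
--                 if len(novaLinha) > len(linhaMaxima):
--                     linhaMaxima = novaLinha
--             return linhaMaxima
--
-- def ordenaLinhaInd(linha: list[CoordData]) -> list[CoordData]:
--     if not linha:
--         raise ValueError(f"não foi possível ordenar a linha, analise: {linha}")
--     melhor = None
--     for ponto in linha:
--         candidato = ordenaLinhaIt(linha.copy(), inicio=ponto)
--         if melhor is None or len(candidato) > len(melhor):
--             melhor = candidato
--     return melhor
-- ===== Notes on version B (the rewrite author's own statement) =====
-- stated objective: faster
-- what changed: B computes ordenaLinhaIt once per start point in a single pass and keeps the first longest result, instead of A's descending-target-length outer loop that recomputes ordenaLinhaIt for every (target length, start) pair.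
import Mathlib
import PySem

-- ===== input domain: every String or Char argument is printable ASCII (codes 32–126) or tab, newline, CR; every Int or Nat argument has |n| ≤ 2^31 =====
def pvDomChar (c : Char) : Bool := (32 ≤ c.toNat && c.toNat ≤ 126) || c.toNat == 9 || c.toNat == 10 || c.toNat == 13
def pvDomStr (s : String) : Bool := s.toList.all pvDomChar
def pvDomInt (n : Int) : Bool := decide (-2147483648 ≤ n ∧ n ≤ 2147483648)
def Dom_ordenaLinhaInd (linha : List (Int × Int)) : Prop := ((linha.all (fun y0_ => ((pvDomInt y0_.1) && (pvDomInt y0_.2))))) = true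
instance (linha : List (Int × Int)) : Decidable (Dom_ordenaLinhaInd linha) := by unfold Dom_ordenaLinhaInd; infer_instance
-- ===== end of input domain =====

-- B replaces A's descending-target double loop (which recomputes ordenaLinhaIt for every
-- (target length, start) pair) by a single pass computing each start's ordering once and
-- keeping the first longest: faster.

-- ===== PORT A =====
-- the eight neighbours produced by apply_direction, in Direction's enumeration order
def pvViz (p : Int × Int) : List (Int × Int) :=
  [(p.1 + 1, p.2 + 1), (p.1, p.2 + 1), (p.1 - 1, p.2 + 1), (p.1 - 1, p.2),
   (p.1 - 1, p.2 - 1), (p.1, p.2 - 1), (p.1 + 1, p.2 - 1), (p.1 + 1, p.2)]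

-- ordenaLinhaIt: its while-loop and its recursion on `anteriores = linhaOrdenada + [ponto]` become
-- one fuel recursion on the state (linhaDesordenada, linhaOrdenada, pontoInicial); fuel is only a
-- totality guard (fuel = |linha| + 1 is never exhausted: every consuming step appends a point of
-- linhaDesordenada that is not yet in linhaOrdenada).
def pvIt (fuel : Nat) (desord : List (Int × Int)) (ordenada : List (Int × Int))
    (pontoInicial : Int × Int) : List (Int × Int) :=
  match fuel with
  | 0 => ordenada
  | fuel + 1 =>
    let pontos := (pvViz pontoInicial).filter (fun q => desord.contains q && !ordenada.contains q)
    match pontos with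
    | [] => ordenada
    | [q] => pvIt fuel desord (ordenada ++ [q]) q
    | _ => pontos.foldl (fun melhor q =>
        let nova := pvIt fuel desord (ordenada ++ [q]) q
        if nova.length > melhor.length then nova else melhor) ordenada

-- A's inner `for n in range(tamanho)` with early return: recursion over the remaining indices
def pvInnerA (linha : List (Int × Int)) (tamanhoPossivel : Int) :
    List Int → Option (List (Int × Int))
  | [] => none
  | n :: ns =>
    let primeiroPonto := PySem.List.pyGetD linha n (0, 0)
    let linhaTeste := pvIt (linha.length + 1) linha [primeiroPonto] primeiroPonto
    if ((linhaTeste.length : Int)) == tamanhoPossivel then some linhaTeste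
    else pvInnerA linha tamanhoPossivel ns

-- A's outer `for tamanhoPossivel in range(tamanho, -1, -1)` with early return
def pvOuterA (linha : List (Int × Int)) : List Int → Option (List (Int × Int))
  | [] => none
  | tp :: tps =>
    match pvInnerA linha tp (PySem.List.pyRange 0 (linha.length : Int) 1) with
    | some r => some r
    | none => pvOuterA linha tps

def ordenaLinhaInd (linha : List (Int × Int)) : List (Int × Int) :=
  (pvOuterA linha (PySem.List.pyRange (linha.length : Int) (-1) (-1))).getD []
  -- `none` is the final `raise ValueError` path, excluded by Pre_

-- ===== PORT B =====
-- B's single pass over linha carrying `melhor` (None at first)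
def pvLoopB (linha : List (Int × Int)) (melhor : Option (List (Int × Int))) :
    List (Int × Int) → Option (List (Int × Int))
  | [] => melhor
  | ponto :: resto =>
    let candidato := pvIt (linha.length + 1) linha [ponto] ponto
    match melhor with
    | none => pvLoopB linha (some candidato) resto
    | some m => pvLoopB linha (if candidato.length > m.length then some candidato else some m) resto

def ordenaLinhaInd_alt (linha : List (Int × Int)) : List (Int × Int) :=
  (pvLoopB linha none linha).getD []
  -- `none` only for linha = [], the raise path excluded by Pre_

-- ===== PRECONDITION & SPEC =====
-- Pre_ excludes only the empty list, on which A (and B) raise ValueError.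
def Pre_ordenaLinhaInd (linha : List (Int × Int)) : Prop := linha ≠ []
instance (linha : List (Int × Int)) : Decidable (Pre_ordenaLinhaInd linha) := by
  unfold Pre_ordenaLinhaInd; infer_instance

def pvWitness_ordenaLinhaInd : (List (Int × Int)) := [(0, 0), (1, 1)]

def Spec_ordenaLinhaInd (linha : List (Int × Int)) (out : List (Int × Int)) : Prop := out = ordenaLinhaInd_alt linha
instance (linha : List (Int × Int)) (out : List (Int × Int)) : Decidable (Spec_ordenaLinhaInd linha out) := by unfold Spec_ordenaLinhaInd; infer_instance

-- ===== CLAIM (what is proved, stated in full; the proofs are below) =====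
def Claim_equal_ordenaLinhaInd : Prop := ∀ (linha : List (Int × Int)), Dom_ordenaLinhaInd linha → Pre_ordenaLinhaInd linha → Spec_ordenaLinhaInd linha (ordenaLinhaInd linha)

-- ===== LEMMAS AND PROOFS =====

-- the argmax step of B's loop, on the payload
def pvG (a c : List (Int × Int)) : List (Int × Int) := if c.length > a.length then c else a

-- B's loop, once melhor is some m, is the payload fold with pvG
theorem pvLoopB_some (linha : List (Int × Int)) (l : List (Int × Int)) :
    ∀ m, pvLoopB linha (some m) l
      = some (l.foldl (fun a c => pvG a (pvIt (linha.length + 1) linha [c] c)) m) := by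
  induction l with
  | nil => intro m; rfl
  | cons a l ih =>
    intro m
    simp only [pvLoopB, List.foldl_cons, pvG]
    by_cases h : (pvIt (linha.length + 1) linha [a] a).length > m.length
    · rw [if_pos h, if_pos h]; exact ih _
    · rw [if_neg h, if_neg h]; exact ih _

theorem pvG_fold_le_init (cs : List (List (Int × Int))) (m : List (Int × Int)) :
    m.length ≤ (cs.foldl pvG m).length := by
  induction cs generalizing m with
  | nil => simp
  | cons c cs ih =>
    refine le_trans ?_ (ih (pvG m c))
    simp only [pvG]; split_ifs with h <;> omega

theorem pvG_fold_le (cs : List (List (Int × Int))) (m : List (Int × Int)) :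
    ∀ c ∈ cs, c.length ≤ (cs.foldl pvG m).length := by
  induction cs generalizing m with
  | nil => simp
  | cons c cs ih =>
    intro d hd
    rcases List.mem_cons.mp hd with rfl | hd
    · refine le_trans ?_ (pvG_fold_le_init cs (pvG m d))
      simp only [pvG]; split_ifs with h <;> omega
    · exact ih (pvG m c) d hd

-- first-max characterisation: the fold result is the first element of m :: cs of maximal length
theorem pvG_fold_find (cs : List (List (Int × Int))) (m : List (Int × Int)) :
    (m :: cs).find? (fun c => c.length == (cs.foldl pvG m).length) = some (cs.foldl pvG m) := by
  induction cs generalizing m with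
  | nil => simp
  | cons c cs ih =>
    simp only [List.foldl_cons]
    by_cases h : c.length > m.length
    · have hg : pvG m c = c := by simp [pvG, h]
      rw [hg]
      have := ih c
      have hm : (m.length == (cs.foldl pvG c).length) = false := by
        have := pvG_fold_le_init cs c
        simp only [beq_eq_false_iff_ne, ne_eq]; omega
      rw [List.find?_cons_of_neg (by simp [hm])]
      exact this
    · have hg : pvG m c = m := by simp [pvG, h]
      rw [hg]
      have := ih m
      rw [List.find?_cons] at this
      by_cases he : (m.length == (cs.foldl pvG m).length) = true
      · rw [he] at this
        simp only [Option.some.injEq] at this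
        rw [List.find?_cons_of_pos (p := fun c => c.length == (List.foldl pvG m cs).length) (a := m) he]
        exact congrArg some this
      · have hne : ¬ m.length = (cs.foldl pvG m).length := by simpa using he
        have hlt : m.length < (cs.foldl pvG m).length :=
          lt_of_le_of_ne (pvG_fold_le_init cs m) hne
        rw [List.find?_cons_of_neg (by simpa using hne)]
        have hc : (c.length == (cs.foldl pvG m).length) = false := by
          simp only [beq_eq_false_iff_ne, ne_eq]; omega
        rw [List.find?_cons_of_neg (by simp [hc])]
        simp only [Bool.not_eq_true] at he
        rw [he] at this
        exact this

-- a fold whose step keeps either the accumulator or a candidate preserves any predicate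
theorem pv_fold_choice {α : Type} (P : List (Int × Int) → Prop) (nova : α → List (Int × Int)) :
    ∀ (qs : List α) (m : List (Int × Int)), P m → (∀ q ∈ qs, P (nova q)) →
    P (qs.foldl (fun melhor q => if (nova q).length > melhor.length then nova q else melhor) m) := by
  intro qs
  induction qs with
  | nil => intro m hm _; exact hm
  | cons q qs ih =>
    intro m hm hq
    simp only [List.foldl_cons]
    apply ih
    · split_ifs with h
      · exact hq q (List.mem_cons_self)
      · exact hm
    · intro r hr; exact hq r (List.mem_cons_of_mem _ hr)

-- invariant of ordenaLinhaIt: the result is duplicate-free and drawn from desord ∪ ordenada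
theorem pvIt_inv (fuel : Nat) : ∀ (desord ordenada : List (Int × Int)) (p : Int × Int),
    ordenada.Nodup → (∀ x ∈ ordenada, x ∈ desord) →
    (pvIt fuel desord ordenada p).Nodup ∧ ∀ x ∈ pvIt fuel desord ordenada p, x ∈ desord := by
  induction fuel with
  | zero => intro desord ordenada p h1 h2; exact ⟨h1, h2⟩
  | succ fuel ih =>
    intro desord ordenada p h1 h2
    rw [pvIt]
    have hmem : ∀ q ∈ (pvViz p).filter (fun q => desord.contains q && !ordenada.contains q),
        q ∈ desord ∧ q ∉ ordenada := by
      intro q hq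
      have := List.of_mem_filter hq
      simp only [Bool.and_eq_true, Bool.not_eq_true', List.contains_eq_mem,
        decide_eq_true_eq, decide_eq_false_iff_not] at this
      exact this
    have hstep : ∀ q, q ∈ desord → q ∉ ordenada →
        (pvIt fuel desord (ordenada ++ [q]) q).Nodup ∧
        ∀ x ∈ pvIt fuel desord (ordenada ++ [q]) q, x ∈ desord := by
      intro q hqd hqo
      apply ih
      · simp [List.nodup_append, h1]
        intro a b hab h
        exact hqo (h ▸ hab)
      · intro x hx
        rcases List.mem_append.mp hx with hx | hx
        · exact h2 x hx
        · simp only [List.mem_singleton] at hx; exact hx ▸ hqd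
    cases hp : (pvViz p).filter (fun q => desord.contains q && !ordenada.contains q) with
    | nil => exact ⟨h1, h2⟩
    | cons q qs =>
      cases qs with
      | nil =>
        have := hmem q (by rw [hp]; simp)
        exact hstep q this.1 this.2
      | cons q' qs' =>
        apply pv_fold_choice (fun l => l.Nodup ∧ ∀ x ∈ l, x ∈ desord)
        · exact ⟨h1, h2⟩
        · intro r hr
          have := hmem r (by rw [hp]; exact hr)
          exact hstep r this.1 this.2

-- hence every candidate ordering is at most as long as linha
theorem pvIt_len (linha : List (Int × Int)) (p : Int × Int) (hp : p ∈ linha) :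
    (pvIt (linha.length + 1) linha [p] p).length ≤ linha.length := by
  have h := pvIt_inv (linha.length + 1) linha [p] p (by simp) (by simpa using hp)
  exact (h.1.subperm (fun x hx => h.2 x hx)).length_le

-- the inner index loop is find? over the candidate orderings
theorem pvInnerA_find (linha : List (Int × Int)) (tp : Int) (ns : List Int) :
    pvInnerA linha tp ns
      = ((ns.map (fun n => PySem.List.pyGetD linha n (0, 0))).map
          (fun q => pvIt (linha.length + 1) linha [q] q)).find?
          (fun c => ((c.length : Int)) == tp) := by
  induction ns with
  | nil => rfl
  | cons n ns ih =>
    simp only [pvInnerA, List.map_cons]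
    by_cases h : ((((pvIt (linha.length + 1) linha [PySem.List.pyGetD linha n (0, 0)]
        (PySem.List.pyGetD linha n (0, 0))).length : Int)) == tp) = true
    · rw [if_pos h, List.find?_cons_of_pos (p := fun c : List (Int × Int) => ((c.length : Int)) == tp) h]
    · rw [if_neg (by simpa using h), List.find?_cons_of_neg (by simpa using h)]
      exact ih

-- the descending outer loop returns the first target length some candidate reaches
theorem pvOuterA_hit (linha : List (Int × Int)) (b : List (Int × Int)) (B : Nat) :
    ∀ L : Nat, B ≤ L →
    (∀ t : Int, (B : Int) < t →
      pvInnerA linha t (PySem.List.pyRange 0 (linha.length : Int) 1) = none) →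
    pvInnerA linha (B : Int) (PySem.List.pyRange 0 (linha.length : Int) 1) = some b →
    pvOuterA linha (PySem.List.pyRange (L : Int) (-1) (-1)) = some b := by
  intro L
  induction L with
  | zero =>
    intro hBL _ hB
    interval_cases B
    rw [PySem.List.pyRange_neg_one_cons (by norm_num),
      PySem.List.pyRange_neg_one_eq_nil (by norm_num)]
    rw [pvOuterA]
    simp only [Nat.cast_zero] at hB ⊢
    rw [hB]
  | succ L ih =>
    intro hBL hnone hB
    have hcons : PySem.List.pyRange ((L + 1 : Nat) : Int) (-1) (-1)
        = ((L + 1 : Nat) : Int) :: PySem.List.pyRange ((L : Nat) : Int) (-1) (-1) := by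
      have h2 : ((L + 1 : Nat) : Int) - 1 = ((L : Nat) : Int) := by push_cast; ring
      rw [PySem.List.pyRange_neg_one_cons (by push_cast; omega), h2]
    rw [hcons, pvOuterA]
    rcases eq_or_lt_of_le hBL with rfl | hlt
    · rw [hB]
    · have h1 : pvInnerA linha ((L + 1 : Nat) : Int) (PySem.List.pyRange 0 (linha.length : Int) 1)
          = none := hnone _ (by exact_mod_cast hlt)
      rw [h1]
      exact ih (by omega) hnone hB

-- find? with the Int-cast length predicate is find? with the Nat one
theorem pv_find_cast (cs : List (List (Int × Int))) (B : Nat) :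
    cs.find? (fun c => ((c.length : Int)) == (B : Int)) = cs.find? (fun c => c.length == B) := by
  congr 1
  funext c
  simp

-- ===== VERDICT (by name: the statement is the Claim_ definition above) =====
theorem ordenaLinhaInd_spec : Claim_equal_ordenaLinhaInd := by
  intro linha _ hpre
  unfold Spec_ordenaLinhaInd
  obtain ⟨p, rest, rfl⟩ : ∃ p rest, linha = p :: rest := by
    cases linha with
    | nil => exact absurd rfl hpre
    | cons p rest => exact ⟨p, rest, rfl⟩
  set linha := p :: rest with hlinha
  set F : (Int × Int) → List (Int × Int) := fun q => pvIt (linha.length + 1) linha [q] q with hF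
  set cs : List (List (Int × Int)) := rest.map F with hcs
  set b : List (Int × Int) := cs.foldl pvG (F p) with hb
  have haltb : ordenaLinhaInd_alt linha = b := by
    unfold ordenaLinhaInd_alt
    rw [show pvLoopB linha none linha = pvLoopB linha (some (F p)) rest from rfl]
    rw [pvLoopB_some]
    rw [← List.foldl_map]
    rfl
  have hmax : ∀ c ∈ F p :: cs, c.length ≤ b.length := by
    intro c hc
    rcases List.mem_cons.mp hc with rfl | hc
    · exact pvG_fold_le_init cs (F p)
    · exact pvG_fold_le cs (F p) c hc
  have hfind : (F p :: cs).find? (fun c => c.length == b.length) = some b := pvG_fold_find cs (F p)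
  have hbmem : b ∈ F p :: cs := List.mem_of_find?_eq_some hfind
  have hBle : b.length ≤ linha.length := by
    rcases List.mem_cons.mp hbmem with heq | hc
    · rw [heq]; exact pvIt_len linha p (by simp [hlinha])
    · obtain ⟨q, hq, hqb⟩ := List.mem_map.mp hc
      rw [← hqb]
      exact pvIt_len linha q (by simp [hlinha, hq])
  have hinner : ∀ tp : Int,
      pvInnerA linha tp (PySem.List.pyRange 0 (linha.length : Int) 1)
        = (F p :: cs).find? (fun c => ((c.length : Int)) == tp) := by
    intro tp
    rw [pvInnerA_find, PySem.List.map_pyGetD_pyRange_zero']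
    rw [show linha.map F = F p :: cs by simp [hlinha, hcs]]
  show ordenaLinhaInd linha = ordenaLinhaInd_alt linha
  unfold ordenaLinhaInd
  have houter : pvOuterA linha (PySem.List.pyRange (linha.length : Int) (-1) (-1)) = some b := by
    apply pvOuterA_hit linha b b.length linha.length hBle
    · intro t ht
      rw [hinner t, List.find?_eq_none]
      intro c hc
      have := hmax c hc
      simp only [ne_eq, beq_iff_eq]
      intro h
      omega
    · rw [hinner (b.length : Int), pv_find_cast]
      exact hfind
  rw [houter, haltb]
  rfl
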